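-- pv_equiv track=rewrite | github.com/HunterSun2005/Ai4child | src/aichild/trainer.py | _track2_subject_counts
-- ===== SOURCE A (Python) =====
-- from collections import Counter, defaultdict
-- from typing import Dict, List, Optional, Tuple
--
-- def _track2_subject_counts(
--     subject_ids: List[int],
--     subject_labels: Dict[int, Tuple[int, int]],
-- ) -> Dict[str, Dict[int, int]]:
--     left = Counter()
--     right = Counter()
--     for sid in subject_ids:
--         if sid not in subject_labels:
--             continue
--         l, r = subject_labels[sid]
--         left[l] += 1
--         right[r] += 1
--     return {
--         "left": dict(sorted(left.items())),
--         "right": dict(sorted(right.items())),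
--     }
-- ===== SOURCE B (Python) =====
-- from typing import Dict, List, Tuple
--
--
-- def _track2_subject_counts(
--     subject_ids: List[int],
--     subject_labels: Dict[int, Tuple[int, int]],
-- ) -> Dict[str, Dict[int, int]]:
--     # One pass collecting the label values, then sort-and-scan run counting
--     # (no Counter / hash counting at all).
--     lefts: List[int] = []
--     rights: List[int] = []
--     for sid in subject_ids:
--         if sid in subject_labels:
--             l, r = subject_labels[sid]
--             lefts.append(l)
--             rights.append(r)
--
--     def _run_counts(vals: List[int]) -> Dict[int, int]:
--         vs = sorted(vals)
--         out: Dict[int, int] = {}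
--         i = 0
--         n = len(vs)
--         while i < n:
--             j = i + 1
--             while j < n and vs[j] == vs[i]:
--                 j += 1
--             out[vs[i]] = j - i
--             i = j
--         return out
--
--     return {"left": _run_counts(lefts), "right": _run_counts(rights)}
-- ===== Notes on version B (the rewrite author's own statement) =====
-- stated objective: alternative
-- what changed: B makes one pass collecting the left/right label values into plain lists, then sorts each list and counts runs of equal values in a single scan, producing the key-sorted count dicts directly instead of hash-counting with Counter and sorting the items afterwards.
import Mathlib
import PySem

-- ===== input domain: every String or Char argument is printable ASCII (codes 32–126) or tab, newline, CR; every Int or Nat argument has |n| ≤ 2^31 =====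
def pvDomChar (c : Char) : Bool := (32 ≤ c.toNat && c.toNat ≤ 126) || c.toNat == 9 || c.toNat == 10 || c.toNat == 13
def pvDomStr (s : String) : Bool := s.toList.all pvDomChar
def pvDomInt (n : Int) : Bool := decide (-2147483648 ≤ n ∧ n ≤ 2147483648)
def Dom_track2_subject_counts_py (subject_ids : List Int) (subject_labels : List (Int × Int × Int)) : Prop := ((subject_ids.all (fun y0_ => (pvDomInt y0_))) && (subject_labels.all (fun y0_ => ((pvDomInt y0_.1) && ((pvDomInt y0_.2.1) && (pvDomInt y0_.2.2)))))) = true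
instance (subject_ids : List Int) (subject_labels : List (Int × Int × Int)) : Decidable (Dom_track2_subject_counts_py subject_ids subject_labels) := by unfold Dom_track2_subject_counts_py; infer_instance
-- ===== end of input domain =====

-- B replaces Counter-then-sort by one collecting pass plus sort-and-scan run counting (alternative algorithm, same result).


-- ===== PORT A =====
-- Counter-based: one loop incrementing two Counters (dict modify with default 0),
-- then sorted(items) for each; dict() of key-distinct sorted pairs is the pairs list itself.
def track2_subject_counts_py (subject_ids : List Int) (subject_labels : List (Int × Int × Int)) : List (String × List (Int × Int)) :=
  let lr := subject_ids.foldl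
    (fun (p : PySem.Dict Int Int × PySem.Dict Int Int) (sid : Int) =>
      match subject_labels.find? (fun q => q.1 == sid) with
      | none => p
      | some q => (p.1.modify q.2.1 0 (fun c => c + 1), p.2.modify q.2.2 0 (fun c => c + 1)))
    (PySem.Dict.empty, PySem.Dict.empty)
  [("left", PySem.List.sorted2 lr.1.items (fun p => p.1) (fun p => p.2) false),
   ("right", PySem.List.sorted2 lr.2.items (fun p => p.1) (fun p => p.2) false)]

-- ===== PORT B =====
-- run-scan over a sorted list: the while-loop pair (i, j past the run) becomes
-- structural recursion with takeWhile/dropWhile on the current run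
def pvRuns : List Int → List (Int × Int)
  | [] => []
  | x :: xs =>
      (x, ((xs.takeWhile (fun y => y == x)).length : Int) + 1) :: pvRuns (xs.dropWhile (fun y => y == x))
termination_by ws => ws.length
decreasing_by
  exact Nat.lt_succ_of_le (List.dropWhile_sublist _).length_le

def track2_subject_counts_py_alt (subject_ids : List Int) (subject_labels : List (Int × Int × Int)) : List (String × List (Int × Int)) :=
  let lr := subject_ids.foldl
    (fun (p : List Int × List Int) (sid : Int) =>
      match subject_labels.find? (fun q => q.1 == sid) with
      | none => p
      | some q => (p.1 ++ [q.2.1], p.2 ++ [q.2.2]))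
    ([], [])
  [("left", pvRuns (PySem.List.sorted lr.1 (fun x => x) false)),
   ("right", pvRuns (PySem.List.sorted lr.2 (fun x => x) false))]

-- ===== PRECONDITION & SPEC =====
def Spec_track2_subject_counts_py (subject_ids : List Int) (subject_labels : List (Int × Int × Int)) (out : List (String × List (Int × Int))) : Prop := out = track2_subject_counts_py_alt subject_ids subject_labels
instance (subject_ids : List Int) (subject_labels : List (Int × Int × Int)) (out : List (String × List (Int × Int))) : Decidable (Spec_track2_subject_counts_py subject_ids subject_labels out) := by unfold Spec_track2_subject_counts_py; infer_instance

-- ===== CLAIM (what is proved, stated in full; the proofs are below) =====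
def Claim_equal_track2_subject_counts_py : Prop := ∀ (subject_ids : List Int) (subject_labels : List (Int × Int × Int)), Dom_track2_subject_counts_py subject_ids subject_labels → Spec_track2_subject_counts_py subject_ids subject_labels (track2_subject_counts_py subject_ids subject_labels)

-- ===== LEMMAS AND PROOFS =====

-- the left / right label values collected in order, as a filterMap
def pvCollectL (labels : List (Int × Int × Int)) (ids : List Int) : List Int :=
  ids.filterMap (fun sid => (labels.find? (fun q => q.1 == sid)).map (fun q => q.2.1))
def pvCollectR (labels : List (Int × Int × Int)) (ids : List Int) : List Int :=
  ids.filterMap (fun sid => (labels.find? (fun q => q.1 == sid)).map (fun q => q.2.2))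

theorem pvFoldB (labels : List (Int × Int × Int)) (ids : List Int) :
    ∀ (ls rs : List Int),
      ids.foldl (fun (p : List Int × List Int) (sid : Int) =>
          match labels.find? (fun q => q.1 == sid) with
          | none => p
          | some q => (p.1 ++ [q.2.1], p.2 ++ [q.2.2])) (ls, rs)
        = (ls ++ pvCollectL labels ids, rs ++ pvCollectR labels ids) := by
  induction ids with
  | nil => simp [pvCollectL, pvCollectR]
  | cons sid ids ih =>
      intro ls rs
      simp only [List.foldl_cons]
      cases h : labels.find? (fun q => q.1 == sid) with
      | none => simp [pvCollectL, pvCollectR, List.filterMap_cons, h] at ih ⊢; exact ih ls rs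
      | some q =>
          simp only [pvCollectL, pvCollectR, List.filterMap_cons, h, Option.map_some] at ih ⊢
          rw [ih]
          simp [pvCollectL, pvCollectR]

theorem pvFoldA (labels : List (Int × Int × Int)) (ids : List Int) :
    ∀ (dl dr : PySem.Dict Int Int),
      ids.foldl (fun (p : PySem.Dict Int Int × PySem.Dict Int Int) (sid : Int) =>
          match labels.find? (fun q => q.1 == sid) with
          | none => p
          | some q => (p.1.modify q.2.1 0 (fun c => c + 1), p.2.modify q.2.2 0 (fun c => c + 1))) (dl, dr)
        = ((pvCollectL labels ids).foldl (fun d x => d.modify x 0 (fun c => c + 1)) dl,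
           (pvCollectR labels ids).foldl (fun d x => d.modify x 0 (fun c => c + 1)) dr) := by
  induction ids with
  | nil => simp [pvCollectL, pvCollectR]
  | cons sid ids ih =>
      intro dl dr
      simp only [List.foldl_cons]
      cases h : labels.find? (fun q => q.1 == sid) with
      | none => simp [pvCollectL, pvCollectR, List.filterMap_cons, h] at ih ⊢; exact ih dl dr
      | some q =>
          simp only [pvCollectL, pvCollectR, List.filterMap_cons, h, Option.map_some] at ih ⊢
          rw [ih]
          simp [pvCollectL, pvCollectR]

-- insertBy / sorted2 congruence: the comparator only matters on the elements present
theorem pvInsertBy_congr {α : Type} (b1 b2 : α → α → Bool) (x : α) (acc : List α)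
    (h : ∀ y ∈ acc, b1 x y = b2 x y) :
    PySem.List.insertBy b1 x acc = PySem.List.insertBy b2 x acc := by
  induction acc with
  | nil => rfl
  | cons y ys ih =>
      have hy := h y (by simp)
      simp only [PySem.List.insertBy, hy]
      split
      · rfl
      · have := ih (fun z hz => h z (by simp [hz]))
        simpa [PySem.List.insertBy] using congrArg (y :: ·) this

theorem pvFoldl_insertBy_congr {α : Type} (b1 b2 : α → α → Bool) :
    ∀ (xs acc : List α),
      (∀ a ∈ xs, ∀ y, (y ∈ acc ∨ y ∈ xs) → b1 a y = b2 a y) →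
      xs.foldl (fun acc x => PySem.List.insertBy b1 x acc) acc
        = xs.foldl (fun acc x => PySem.List.insertBy b2 x acc) acc := by
  intro xs
  induction xs with
  | nil => intro acc _; rfl
  | cons x xs ih =>
      intro acc h
      simp only [List.foldl_cons]
      rw [pvInsertBy_congr b1 b2 x acc (fun y hy => h x (by simp) y (Or.inl hy))]
      exact ih _ (fun a ha y hy => h a (by simp [ha]) y (by
        rcases hy with hy | hy
        · rcases (PySem.List.mem_insertBy b2 x y acc).1 hy with rfl | hy
          · exact Or.inr (by simp)
          · exact Or.inl hy
        · exact Or.inr (by simp [hy])))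

-- on pairs whose first components are all distinct, the lexicographic comparator
-- of sorted2 coincides with comparing first components only
theorem pvSorted2_eq_sorted_fst (xs : List (Int × Int))
    (hnd : (xs.map Prod.fst).Nodup) :
    PySem.List.sorted2 xs (fun p => p.1) (fun p => p.2) false
      = PySem.List.sorted xs (fun p => p.1) false := by
  rw [PySem.List.sorted_eq_foldl_insertBy]
  show List.foldl (fun acc x => PySem.List.insertBy
      (fun a b => decide (a.1 < b.1) || !decide (b.1 < a.1) && decide (a.2 < b.2)) x acc) [] xs = _
  apply pvFoldl_insertBy_congr
  intro a ha y hy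
  rcases hy with hy | hy
  · simp at hy
  · by_cases hab : a.1 = y.1
    · have hay : a = y := List.inj_on_of_nodup_map hnd ha hy hab
      subst hay
      simp
    · by_cases hlt : a.1 < y.1
      · simp [hlt]
      · have hgt : y.1 < a.1 := by omega
        simp [hlt, hgt]

-- characterisation of pvRuns on a nondecreasing list
-- after dropping the leading run of x from a nondecreasing list bounded below by x,
-- everything left is strictly greater than x
theorem pvLtDrop (x : Int) :
    ∀ l : List Int, l.Pairwise (· ≤ ·) → (∀ y ∈ l, x ≤ y) →
      ∀ z ∈ l.dropWhile (fun y => y == x), x < z := by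
  intro l
  induction l with
  | nil => simp
  | cons y l ih =>
      intro hp hle z hz
      rcases List.pairwise_cons.1 hp with ⟨h1, h2⟩
      by_cases hyx : (y == x) = true
      · rw [List.dropWhile_cons, if_pos hyx] at hz
        exact ih h2 (fun w hw => hle w (by simp [hw])) z hz
      · rw [List.dropWhile_cons, if_neg hyx] at hz
        have hxy : x < y := by
          have := hle y (by simp)
          have : y ≠ x := by simpa using hyx
          omega
        rcases List.mem_cons.1 hz with rfl | hz
        · exact hxy
        · exact lt_of_lt_of_le hxy (h1 z hz)

theorem pvRuns_mem : ∀ ws : List Int, ws.Pairwise (· ≤ ·) →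
    ∀ p : Int × Int, p ∈ pvRuns ws ↔ p.1 ∈ ws ∧ p.2 = (ws.count p.1 : Int) := by
  intro ws
  induction ws using pvRuns.induct with
  | case1 => simp [pvRuns]
  | case2 x xs ih =>
      intro hp p
      rcases List.pairwise_cons.1 hp with ⟨h1, h2⟩
      have hd := pvLtDrop x xs h2 h1
      have hpd : (xs.dropWhile (fun y => y == x)).Pairwise (· ≤ ·) :=
        List.Pairwise.sublist (List.dropWhile_sublist _) h2
      have ihm := ih hpd
      have hsplit : xs.takeWhile (fun y => y == x) ++ xs.dropWhile (fun y => y == x) = xs :=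
        List.takeWhile_append_dropWhile
      have hct : (xs.takeWhile (fun y => y == x)).count x = (xs.takeWhile (fun y => y == x)).length :=
        List.count_eq_length.2 (fun b hb => by
          have := List.mem_takeWhile_imp hb
          simp at this
          omega)
      have hcd : (xs.dropWhile (fun y => y == x)).count x = 0 :=
        List.count_eq_zero.2 (fun hxd => lt_irrefl x (hd x hxd))
      have hcx : (x :: xs).count x = (xs.takeWhile (fun y => y == x)).length + 1 := by
        have h' : List.count x xs = (xs.takeWhile (fun y => y == x)).length := by
          conv_lhs => rw [← hsplit]
          rw [List.count_append, hct, hcd]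
          omega
        rw [List.count_cons_self, h']
        
      have hck : ∀ k : Int, k ≠ x →
          (x :: xs).count k = (xs.dropWhile (fun y => y == x)).count k := by
        intro k hk
        have hctk : (xs.takeWhile (fun y => y == x)).count k = 0 :=
          List.count_eq_zero.2 (fun hkt => by
            have := List.mem_takeWhile_imp hkt
            simp at this
            omega)
        have hstep : List.count k (x :: xs) = List.count k xs := by
          simp [List.count_cons, Ne.symm hk]
        have h' : List.count k xs = (xs.dropWhile (fun y => y == x)).count k := by
          conv_lhs => rw [← hsplit]
          rw [List.count_append, hctk, Nat.zero_add]
        rw [hstep, h']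
      rw [pvRuns]
      constructor
      · intro hmem
        rcases List.mem_cons.1 hmem with rfl | hmem
        · refine ⟨by simp, ?_⟩
          simp [hcx]
        · rcases (ihm p).1 hmem with ⟨hpd1, hpd2⟩
          have hne : p.1 ≠ x := fun he => lt_irrefl x (he ▸ hd p.1 hpd1)
          refine ⟨List.mem_cons_of_mem x ((List.dropWhile_sublist _).mem hpd1), ?_⟩
          rw [hck p.1 hne]
          exact hpd2
      · rintro ⟨hmem, hcnt⟩
        by_cases hpx : p.1 = x
        · have h2v : p.2 = ((xs.takeWhile (fun y => y == x)).length : Int) + 1 := by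
            rw [hcnt, hpx, hcx]; push_cast; ring
          have hpe : p = (x, ((xs.takeWhile (fun y => y == x)).length : Int) + 1) := by
            calc p = (p.1, p.2) := rfl
              _ = _ := by rw [hpx, h2v]
          rw [hpe]
          exact List.mem_cons_self ..
        · right
          have hmx : p.1 ∈ xs := by
            rcases List.mem_cons.1 hmem with he | hm
            · exact absurd he hpx
            · exact hm
          have hmd : p.1 ∈ xs.dropWhile (fun y => y == x) := by
            rw [← hsplit] at hmx
            rcases List.mem_append.1 hmx with hmt | hmd
            · exact absurd (by simpa using List.mem_takeWhile_imp hmt) hpx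
            · exact hmd
          exact (ihm p).2 ⟨hmd, by rw [hcnt, hck p.1 hpx]⟩

theorem pvRuns_pairwise : ∀ ws : List Int, ws.Pairwise (· ≤ ·) →
    (pvRuns ws).Pairwise (fun a b => a.1 < b.1) := by
  intro ws
  induction ws using pvRuns.induct with
  | case1 => simp [pvRuns]
  | case2 x xs ih =>
      intro hp
      rcases List.pairwise_cons.1 hp with ⟨h1, h2⟩
      have hd := pvLtDrop x xs h2 h1
      have hpd : (xs.dropWhile (fun y => y == x)).Pairwise (· ≤ ·) :=
        List.Pairwise.sublist (List.dropWhile_sublist _) h2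
      rw [pvRuns]
      refine List.pairwise_cons.2 ⟨?_, ih hpd⟩
      intro q hq
      have := ((pvRuns_mem _ hpd) q).1 hq
      exact hd q.1 this.1

-- the core: Counter-then-sort equals run-scan of the sorted values
theorem pvCore (vs : List Int) :
    PySem.List.sorted2 (PySem.Dict.counter vs).items (fun p => p.1) (fun p => p.2) false
      = pvRuns (PySem.List.sorted vs (fun x => x) false) := by
  have hitems := PySem.Dict.items_counter vs
  have hndk : ((PySem.Dict.counter vs).items.map Prod.fst).Nodup := by
    rw [hitems, List.map_map]
    simpa [Function.comp_def] using PySem.Set.nodup_ofList vs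
  rw [pvSorted2_eq_sorted_fst _ hndk]
  have hsortp : (PySem.List.sorted vs (fun x => x) false).Pairwise (· ≤ ·) := by
    simpa using PySem.List.sorted_pairwise vs (fun x => x)
  apply PySem.List.sorted_eq_of_perm_of_pairwise_lt
  · -- Perm
    have hnd1 : (pvRuns (PySem.List.sorted vs (fun x => x) false)).Nodup :=
      List.Pairwise.imp (fun h he => by rw [he] at h; exact lt_irrefl _ h)
        (pvRuns_pairwise _ hsortp)
    have hnd2 : (PySem.Dict.counter vs).items.Nodup := by
      rw [hitems]
      exact (PySem.Set.nodup_ofList vs).map (fun a b h => by simpa using congrArg Prod.fst h)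
    rw [List.perm_ext_iff_of_nodup hnd1 hnd2]
    intro p
    rw [pvRuns_mem _ hsortp p, hitems]
    constructor
    · rintro ⟨hmem, hcnt⟩
      rw [PySem.List.mem_sorted _ _ _ _] at hmem
      refine List.mem_map.2 ⟨p.1, (PySem.Set.mem_ofList vs p.1).2 hmem, ?_⟩
      have : (PySem.List.sorted vs (fun x => x) false).count p.1 = vs.count p.1 :=
        (PySem.List.sorted_perm vs (fun x => x) false).count_eq p.1
      rw [this] at hcnt
      exact Prod.ext rfl hcnt.symm
    · intro hm
      rcases List.mem_map.1 hm with ⟨k, hk, hpk⟩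
      subst hpk
      have hkv : k ∈ vs := (PySem.Set.mem_ofList vs k).1 hk
      refine ⟨(PySem.List.mem_sorted _ _ _ _).2 hkv, ?_⟩
      simp [(PySem.List.sorted_perm vs (fun x => x) false).count_eq k]
  · exact pvRuns_pairwise _ hsortp

-- ===== VERDICT (by name: the statement is the Claim_ definition above) =====
theorem track2_subject_counts_py_spec : Claim_equal_track2_subject_counts_py := by
  intro ids labels _
  unfold Spec_track2_subject_counts_py track2_subject_counts_py track2_subject_counts_py_alt
  simp only []
  rw [pvFoldA labels ids, pvFoldB labels ids]
  simp only [List.nil_append]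
  rw [← PySem.Dict.counter_eq_foldl, ← PySem.Dict.counter_eq_foldl]
  rw [pvCore (pvCollectL labels ids), pvCore (pvCollectR labels ids)]
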